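-- pv_equiv track=rewrite | github.com/dheerajalim/leetcode | Stacks/count-greater-elements-to-right.py | count_greater_elements
-- ===== SOURCE A (Python) =====
-- def count_greater_elements(arr):
--     stack = []
--
--     i = len(arr) - 1
--
--     while i >= 0:
--         # lopping through the array
--         # if the stack is not empty
--         # and the current element is less than the top of stack
--         # That case we need to put this element to the correct position
--         if stack and arr[i] <= stack[-1]:
--             # we find the length of stack
--             j = len(stack) - 1
--             # append the new element to the top of stack
--             stack.append(arr[i])
--             # then keep on swapping the last two elements
--             # until the new element reaches the correct position
--             while j + 1 and stack[j] > stack[j + 1]: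
--                 stack[j], stack[j + 1] = stack[j + 1], stack[j]
--                 j -= 1
--             # the elements after this position is the count of greater elements
--             # We update arr position with the count
--             arr[i] = (len(stack) - (j + 1)) - 1
--         # if stack is present and the current element is greater
--         # than the top of stack that means this is the greatest
--         # element already
--         elif stack and arr[i] >= stack[-1]:
--             stack.append(arr[i])
--             arr[i] = 0
--         # otherwise kus add the element to the stack
--         # and the element has no greater count
--         else:
--             stack.append(arr[i])
--             arr[i] = 0
--
--         i -= 1
--     return arr
-- ===== SOURCE B (Python) =====
-- def count_greater_elements(arr):
--     # Like A, mutates arr in place with the counts and returns it.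
--     seen = []          # sorted ascending: elements already to the right
--     out = []           # counts, rightmost first
--     for v in reversed(arr):
--         # binary search: number of seen elements <= v
--         lo, hi = 0, len(seen)
--         while lo < hi:
--             mid = (lo + hi) // 2
--             if seen[mid] <= v:
--                 lo = mid + 1
--             else:
--                 hi = mid
--         out.append(len(seen) - lo)   # strictly greater elements to the right
--         seen.insert(lo, v)
--     out.reverse()
--     arr[:] = out
--     return arr
-- ===== Notes on version B (the rewrite author's own statement) =====
-- stated objective: faster
-- what changed: A inserts each element into its sorted stack by a Python-level adjacent-swap loop that also counts the swaps; B finds the element's rank in the sorted list of already-seen right-hand elements with a binary search and does a single positional insert, collecting the counts and reversing at the end.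
import Mathlib
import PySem

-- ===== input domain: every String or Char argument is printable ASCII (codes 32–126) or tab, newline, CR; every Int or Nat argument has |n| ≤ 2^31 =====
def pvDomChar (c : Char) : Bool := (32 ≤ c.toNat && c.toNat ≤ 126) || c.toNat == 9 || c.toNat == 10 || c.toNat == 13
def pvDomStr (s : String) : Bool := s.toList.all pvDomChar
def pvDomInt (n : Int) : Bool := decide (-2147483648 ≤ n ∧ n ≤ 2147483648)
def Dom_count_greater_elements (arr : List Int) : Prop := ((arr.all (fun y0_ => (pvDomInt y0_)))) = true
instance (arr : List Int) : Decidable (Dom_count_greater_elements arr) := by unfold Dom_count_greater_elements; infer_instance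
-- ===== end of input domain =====

-- B replaces A's adjacent-swap insertion into the sorted stack by a binary search for the
-- rank plus one positional insert (objective: faster). Both A and B mutate `arr` in place
-- in Python; the equivalence proved here is about the RETURN value.

-- ===== PORT A =====
-- A's stack is kept top-first (Python's list reversed): `stack[-1]`, `append` and the
-- adjacent-swap loop all act at the head, one recursion step per swap.
def pvBubbleA (v : Int) : List Int → List Int × Int
  | [] => ([v], 0)
  | y :: ys =>
    if y > v then
      let r := pvBubbleA v ys
      (y :: r.1, r.2 + 1)
    else (v :: y :: ys, 0)

-- the `while i >= 0` loop: returns (result list, stack) for the processed suffix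
def pvGoA : List Int → List Int × List Int
  | [] => ([], [])
  | x :: rest =>
    let s := pvGoA rest
    match s.2 with
    | [] => (0 :: s.1, x :: s.2)            -- `else` branch (empty stack)
    | top :: _ =>
      if x ≤ top then                        -- `if stack and arr[i] <= stack[-1]`
        let b := pvBubbleA x s.2
        (b.2 :: s.1, b.1)
      else if x ≥ top then (0 :: s.1, x :: s.2)  -- `elif stack and arr[i] >= stack[-1]`
      else (0 :: s.1, x :: s.2)                  -- `else`

def count_greater_elements (arr : List Int) : List Int := (pvGoA arr).1

-- ===== PORT B =====
-- the hand-written `while lo < hi` binary search of Source B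
def pvBsrFuel (seen : List Int) (v : Int) : Nat → Int → Int → Int
  | 0, lo, _ => lo
  | n + 1, lo, hi =>
    if lo < hi then
      let mid := PySem.Int.floordiv (lo + hi) 2
      if PySem.List.pyGetD seen mid 0 ≤ v then pvBsrFuel seen v n (mid + 1) hi
      else pvBsrFuel seen v n lo mid
    else lo

-- the fuel (hi - lo).toNat only makes the loop total: each iteration shrinks hi - lo by ≥ 1
def pvBsr (seen : List Int) (v : Int) (lo hi : Int) : Int :=
  pvBsrFuel seen v (hi - lo).toNat lo hi

-- one iteration of `for v in reversed(arr)`; acc = (out, seen)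
def pvStepB (acc : List Int × List Int) (v : Int) : List Int × List Int :=
  let lo := pvBsr acc.2 v 0 (PySem.List.len acc.2)
  (acc.1 ++ [PySem.List.len acc.2 - lo], PySem.List.insert acc.2 lo v)

def count_greater_elements_alt (arr : List Int) : List Int :=
  (arr.reverse.foldl pvStepB ([], [])).1.reverse

-- ===== PRECONDITION & SPEC =====
def Spec_count_greater_elements (arr : List Int) (out : List Int) : Prop := out = count_greater_elements_alt arr
instance (arr : List Int) (out : List Int) : Decidable (Spec_count_greater_elements arr out) := by unfold Spec_count_greater_elements; infer_instance

-- ===== CLAIM (what is proved, stated in full; the proofs are below) =====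
def Claim_equal_count_greater_elements : Prop := ∀ (arr : List Int), Dom_count_greater_elements arr → Spec_count_greater_elements arr (count_greater_elements arr)

-- ===== LEMMAS AND PROOFS =====

-- A's swap loop is ordered insertion: it skips the strictly greater elements and counts them.
theorem pvBubbleA_eq (v : Int) (st : List Int) :
    pvBubbleA v st =
      (st.takeWhile (fun y => decide (v < y)) ++ v :: st.dropWhile (fun y => decide (v < y)),
       ((st.takeWhile (fun y => decide (v < y))).length : Int)) := by
  induction st with
  | nil => simp [pvBubbleA]
  | cons y ys ih =>
    by_cases h : v < y
    · simp [pvBubbleA, h, ih]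
    · simp [pvBubbleA, h]

-- every branch of A's loop body is the same ordered insertion
theorem pvGoA_cons (x : Int) (rest : List Int) :
    pvGoA (x :: rest) =
      ((pvBubbleA x (pvGoA rest).2).2 :: (pvGoA rest).1, (pvBubbleA x (pvGoA rest).2).1) := by
  cases hst : (pvGoA rest).2 with
  | nil => simp [pvGoA, hst, pvBubbleA]
  | cons top ys =>
    by_cases h : x ≤ top
    · simp [pvGoA, hst, h]
    · have h' : ¬ (top > x) := by omega
      simp [pvGoA, hst, h, pvBubbleA, h', show x ≥ top by omega]

-- the binary search returns the length of the ≤-prefix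
theorem pvBsrFuel_eq (v : Int) (a b : List Int)
    (ha : ∀ x ∈ a, x ≤ v) (hb : ∀ x ∈ b, v < x) :
    ∀ (n : Nat) (lo hi : Int), (hi - lo).toNat ≤ n → 0 ≤ lo → lo ≤ (a.length : Int) →
      (a.length : Int) ≤ hi → hi ≤ ((a ++ b).length : Int) →
      pvBsrFuel (a ++ b) v n lo hi = (a.length : Int) := by
  intro n
  induction n with
  | zero =>
    intro lo hi hn h0 h1 h2 h3
    simp only [pvBsrFuel]
    omega
  | succ n ih =>
    intro lo hi hn h0 h1 h2 h3
    rw [pvBsrFuel]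
    by_cases h : lo < hi
    · rw [if_pos h]
      have hmid := PySem.Int.floordiv_two_mid_bounds (le_of_lt h)
      have hmidlt : PySem.Int.floordiv (lo + hi) 2 < hi :=
        (PySem.Int.floordiv_lt_iff_lt_mul (by omega)).2 (by omega)
      set mid := PySem.Int.floordiv (lo + hi) 2 with hm
      have hlen : (a ++ b).length = a.length + b.length := by simp
      have hget : PySem.List.pyGetD (a ++ b) mid 0 = (a ++ b)[mid.toNat] := by
        apply PySem.List.pyGetD_eq_getElem
        · omega
        · omega
      by_cases hc : PySem.List.pyGetD (a ++ b) mid 0 ≤ v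
      · rw [if_pos hc]
        -- the probed element is ≤ v, hence in a: mid < a.length
        have hlt : mid < (a.length : Int) := by
          by_contra hge
          rw [Int.not_lt] at hge
          have hmn : a.length ≤ mid.toNat := by omega
          have hin : (a ++ b)[mid.toNat] ∈ b := by
            have : (a ++ b)[mid.toNat] = b[mid.toNat - a.length] := by
              apply List.getElem_append_right hmn
            rw [this]; exact List.getElem_mem _
          have := hb _ hin
          rw [hget] at hc
          omega
        exact ih (mid + 1) hi (by omega) (by omega) (by omega) h2 h3
      · rw [if_neg hc]
        -- the probed element is > v, hence in b: a.length ≤ mid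
        have hge : (a.length : Int) ≤ mid := by
          by_contra hlt
          rw [Int.not_le] at hlt
          have hmn : mid.toNat < a.length := by omega
          have hin : (a ++ b)[mid.toNat] ∈ a := by
            have : (a ++ b)[mid.toNat] = a[mid.toNat] := List.getElem_append_left hmn
            rw [this]; exact List.getElem_mem _
          have := ha _ hin
          rw [hget] at hc
          omega
        exact ih lo mid (by omega) h0 h1 hge (by omega)
    · rw [if_neg h]
      omega

-- in a descending list, everything the swap loop does not skip is ≤ v
theorem desc_dropWhile_le (v : Int) :
    ∀ (st : List Int), st.Pairwise (fun a b => b ≤ a) →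
      ∀ y ∈ st.dropWhile (fun y => decide (v < y)), y ≤ v := by
  intro st
  induction st with
  | nil => intro _ y hy; simp at hy
  | cons a l ih =>
    intro hp y hy
    rw [List.pairwise_cons] at hp
    by_cases h : v < a
    · rw [List.dropWhile_cons_of_pos (by simpa using h)] at hy
      exact ih hp.2 y hy
    · rw [List.dropWhile_cons_of_neg (by simpa using h)] at hy
      rcases List.mem_cons.1 hy with rfl | hmem
      · omega
      · have := hp.1 y hmem; omega

-- one step of B on the reversed stack agrees with one step of A, and keeps the stack sorted
theorem pvStepB_eq (x : Int) (res : List Int) (st : List Int)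
    (hs : st.Pairwise (fun a b => b ≤ a)) :
    pvStepB (res, st.reverse) x = (res ++ [(pvBubbleA x st).2], (pvBubbleA x st).1.reverse)
      ∧ (pvBubbleA x st).1.Pairwise (fun a b => b ≤ a) := by
  set p := fun y => decide (x < y) with hp
  set tw := st.takeWhile p with htw
  set dw := st.dropWhile p with hdw
  have hsplit : st = tw ++ dw := (List.takeWhile_append_dropWhile (p := p) (l := st)).symm
  have htwmem : ∀ y ∈ tw, x < y := by
    intro y hy
    have := List.mem_takeWhile_imp hy
    simpa [hp] using this
  have hdwmem : ∀ y ∈ dw, y ≤ x := desc_dropWhile_le x st hs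
  have hrev : st.reverse = dw.reverse ++ tw.reverse := by
    rw [hsplit, List.reverse_append]
  have hpw := (List.pairwise_append.1 (hsplit ▸ hs))
  -- the binary search lands exactly between the two halves
  have hbsr : pvBsr st.reverse x 0 (PySem.List.len st.reverse) = (dw.reverse.length : Int) := by
    rw [hrev]
    unfold pvBsr
    apply pvBsrFuel_eq x dw.reverse tw.reverse
      (by intro y hy; exact hdwmem y (List.mem_reverse.1 hy))
      (by intro y hy; exact htwmem y (List.mem_reverse.1 hy))
    · simp [PySem.List.len_eq]
    · omega
    · simp
    · simp [PySem.List.len_eq]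
    · simp [PySem.List.len_eq]
  have hbub := pvBubbleA_eq x st
  have hlenst : st.length = tw.length + dw.length := by
    rw [hsplit]; simp
  constructor
  · unfold pvStepB
    simp only [hbsr, hbub]
    rw [Prod.mk.injEq]
    constructor
    · -- counts agree
      simp only [PySem.List.len_eq, List.length_reverse]
      have : (st.length : Int) - (dw.length : Int) = (tw.length : Int) := by
        omega
      simp [htw, hp, this]
    · -- inserted stacks agree
      have hcast : (dw.reverse.length : Int) = ((dw.reverse.length : Nat) : Int) := rfl
      rw [hrev, PySem.List.insert_natCast (dw.reverse ++ tw.reverse) dw.reverse.length x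
            (by simp)]
      rw [List.take_left, List.drop_left]
      simp [htw, hdw, hp]
  · -- sortedness preserved
    rw [hbub]
    rw [List.pairwise_append]
    refine ⟨hpw.1, ?_, ?_⟩
    · rw [List.pairwise_cons]
      exact ⟨hdwmem, hpw.2.1⟩
    · intro a ha b hb
      rcases List.mem_cons.1 hb with rfl | hbdw
      · have := htwmem a ha; omega
      · exact hpw.2.2 a ha b hbdw

-- the main invariant: B's fold over the reversed array mirrors A's recursion
theorem pvMain (arr : List Int) :
    (pvGoA arr).2.Pairwise (fun a b => b ≤ a)
      ∧ arr.reverse.foldl pvStepB ([], []) = ((pvGoA arr).1.reverse, (pvGoA arr).2.reverse) := by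
  induction arr with
  | nil => simp [pvGoA]
  | cons x rest ih =>
    have hstep := pvStepB_eq x (pvGoA rest).1.reverse (pvGoA rest).2 ih.1
    constructor
    · rw [pvGoA_cons]
      exact hstep.2
    · rw [List.reverse_cons, List.foldl_append, ih.2]
      simp only [List.foldl_cons, List.foldl_nil]
      rw [hstep.1, pvGoA_cons]
      simp

-- ===== VERDICT (by name: the statement is the Claim_ definition above) =====
theorem count_greater_elements_spec : Claim_equal_count_greater_elements := by
  intro arr _
  unfold Spec_count_greater_elements count_greater_elements count_greater_elements_alt
  rw [(pvMain arr).2]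
  simp
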